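-- pv_equiv track=rewrite | github.com/airtal/Leetcode | Solution.py | peopleIndexes
-- ===== SOURCE A (Python) =====
-- from typing import List
--
-- def peopleIndexes(favoriteCompanies: List[List[str]]) -> List[int]:
--     index, n, compSets = {}, 0, []
--     for i, p in enumerate(favoriteCompanies):
--         compSets.append((i, set()))
--         for c in p:
--             if c not in index:
--                 index[c], n = n, n + 1
--             compSets[i][1].add(index[c])
--     compSets.sort(key = lambda x : len(x[1]), reverse=True)
--     ans = []
--     for i in range(len(compSets)):
--         found = False
--         for j in range(i):
--             if len(compSets[j][1]) == len(compSets[i][1]):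
--                 break
--             if compSets[i][1].issubset(compSets[j][1]):
--                 found = True
--                 break
--         if not found:
--             ans.append(compSets[i][0])
--     return sorted(ans)
-- ===== SOURCE B (Python) =====
-- from typing import List
--
-- def peopleIndexes(favoriteCompanies: List[List[str]]) -> List[int]:
--     sets = [set(p) for p in favoriteCompanies]
--     return [i for i, s in enumerate(sets)
--             if not any(len(s) < len(t) and s <= t for t in sets)]
-- ===== Notes on version B (the rewrite author's own statement) =====
-- stated objective: simpler
-- what changed: B drops A's company-to-int re-encoding, the descending sort by set size and the break-early prefix scan, and instead keeps one string set per person and does a direct all-pairs proper-superset test, emitting indices already in ascending order with no final sort.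
import Mathlib
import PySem

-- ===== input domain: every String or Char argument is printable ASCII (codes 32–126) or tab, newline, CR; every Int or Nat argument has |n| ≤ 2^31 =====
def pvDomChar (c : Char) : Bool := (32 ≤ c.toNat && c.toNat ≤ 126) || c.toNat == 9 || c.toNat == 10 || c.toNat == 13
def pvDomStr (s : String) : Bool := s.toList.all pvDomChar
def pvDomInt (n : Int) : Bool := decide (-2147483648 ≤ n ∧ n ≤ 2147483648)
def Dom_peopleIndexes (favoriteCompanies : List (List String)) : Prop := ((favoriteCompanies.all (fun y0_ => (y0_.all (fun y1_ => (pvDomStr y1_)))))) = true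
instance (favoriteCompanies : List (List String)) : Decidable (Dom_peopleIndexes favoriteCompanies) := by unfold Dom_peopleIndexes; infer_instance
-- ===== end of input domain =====

-- B replaces A's company→int re-encoding, descending sort and break-early prefix scan by a direct
-- all-pairs proper-superset test on the string sets themselves (objective: simpler).

-- ===== PORT A =====
-- inner statement of A's first loop: 'if c not in index: index[c], n = n, n+1; compSets[i][1].add(index[c])'
def pvStepA (st : PySem.Dict String Int × Int × PySem.Set Int) (c : String) :
    PySem.Dict String Int × Int × PySem.Set Int :=
  let (index, n, s) := st
  if index.contains c then (index, n, PySem.Set.add s (index.getD c 0))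
  else
    let index' := index.insert c n
    (index', n + 1, PySem.Set.add s (index'.getD c 0))

-- 'for j in range(i): … break' — scan of the already-processed prefix, in order
def pvInnerA (si : PySem.Set Int) : List (Int × PySem.Set Int) → Bool
  | [] => false
  | (_, sj) :: rest =>
    if PySem.Set.len sj = PySem.Set.len si then false
    else if PySem.Set.issubset si sj then true
    else pvInnerA si rest

-- 'for i in range(len(compSets)): …' with the processed prefix threaded through
def pvOuterA : List (Int × PySem.Set Int) → List (Int × PySem.Set Int) → List Int
  | _, [] => []
  | processed, e :: rest =>
    (if pvInnerA e.2 processed then ([] : List Int) else [e.1]) ++ pvOuterA (processed ++ [e]) rest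

def peopleIndexes (favoriteCompanies : List (List String)) : List Int :=
  let r := (PySem.List.enumerate favoriteCompanies).foldl
    (fun (st : PySem.Dict String Int × Int × List (Int × PySem.Set Int)) ip =>
      let pr := ip.2.foldl pvStepA (st.1, st.2.1, PySem.Set.empty)
      (pr.1, pr.2.1, st.2.2 ++ [(ip.1, pr.2.2)]))
    (PySem.Dict.empty, 0, [])
  let compSets := PySem.List.sorted r.2.2 (fun x => PySem.Set.len x.2) true
  PySem.List.sorted (pvOuterA [] compSets) (fun x => x) false

-- ===== PORT B =====
def peopleIndexes_alt (favoriteCompanies : List (List String)) : List Int :=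
  let sets := favoriteCompanies.map (fun p => PySem.Set.ofList p)
  ((PySem.List.enumerate sets).filter
    (fun e => ! sets.any (fun t =>
        decide (PySem.Set.len e.2 < PySem.Set.len t) && PySem.Set.issubset e.2 t))).map
    (fun e => e.1)

-- ===== PRECONDITION & SPEC =====
def Spec_peopleIndexes (favoriteCompanies : List (List String)) (out : List Int) : Prop := out = peopleIndexes_alt favoriteCompanies
instance (favoriteCompanies : List (List String)) (out : List Int) : Decidable (Spec_peopleIndexes favoriteCompanies out) := by unfold Spec_peopleIndexes; infer_instance

-- ===== CLAIM (what is proved, stated in full; the proofs are below) =====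
def Claim_equal_peopleIndexes : Prop := ∀ (favoriteCompanies : List (List String)), Dom_peopleIndexes favoriteCompanies → Spec_peopleIndexes favoriteCompanies (peopleIndexes favoriteCompanies)

-- ===== LEMMAS AND PROOFS =====

def pvInv (d : PySem.Dict String Int) (n : Int) : Prop :=
  (∀ c v, d.get? c = some v → v < n) ∧
  (∀ c c' v, d.get? c = some v → d.get? c' = some v → c = c')

def pvExt (d d' : PySem.Dict String Int) : Prop :=
  ∀ c v, d.get? c = some v → d'.get? c = some v

theorem pvLen {α : Type} (s : PySem.Set α) : PySem.Set.len s = (s.length : Int) := by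
  simp [PySem.Set.len]

theorem pvStepA_spec (d : PySem.Dict String Int) (n : Int) (s : PySem.Set Int) (c : String)
    (h : pvInv d n) :
    pvInv (pvStepA (d, n, s) c).1 (pvStepA (d, n, s) c).2.1 ∧
    pvExt d (pvStepA (d, n, s) c).1 ∧
    (pvStepA (d, n, s) c).1.contains c = true ∧
    (pvStepA (d, n, s) c).2.2 = PySem.Set.add s ((pvStepA (d, n, s) c).1.getD c 0) := by
  by_cases hc : d.contains c = true
  · have e1 : pvStepA (d, n, s) c = (d, n, PySem.Set.add s (d.getD c 0)) := by
      simp [pvStepA, hc]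
    rw [e1]
    dsimp only
    exact ⟨h, fun c v hv => hv, hc, rfl⟩
  · have hc' : d.contains c = false := by simpa using hc
    have hnone : d.get? c = none := by
      rw [PySem.Dict.contains_eq_isSome_get?] at hc'
      exact Option.not_isSome_iff_eq_none.mp (by simp [hc'])
    have e2 : pvStepA (d, n, s) c =
        (d.insert c n, n + 1, PySem.Set.add s ((d.insert c n).getD c 0)) := by
      simp [pvStepA, hc']
    rw [e2]
    dsimp only
    refine ⟨⟨?_, ?_⟩, ?_, ?_, rfl⟩
    · intro c' v hv
      rw [PySem.Dict.get?_insert] at hv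
      by_cases he : c' = c
      · rw [if_pos he] at hv; injection hv with hv; omega
      · rw [if_neg he] at hv; have := h.1 c' v hv; omega
    · intro a b v ha hb
      rw [PySem.Dict.get?_insert] at ha hb
      by_cases hea : a = c <;> by_cases heb : b = c
      · rw [hea, heb]
      · rw [if_pos hea] at ha; rw [if_neg heb] at hb
        injection ha with ha
        exact absurd (h.1 b v hb) (by omega)
      · rw [if_neg hea] at ha; rw [if_pos heb] at hb
        injection hb with hb
        exact absurd (h.1 a v ha) (by omega)
      · rw [if_neg hea] at ha; rw [if_neg heb] at hb
        exact h.2 a b v ha hb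
    · intro c' v hv
      rw [PySem.Dict.get?_insert]
      by_cases he : c' = c
      · rw [he] at hv; rw [hv] at hnone; cases hnone
      · rw [if_neg he]; exact hv
    · exact PySem.Dict.contains_insert_self d c n

theorem pvFoldP (p : List String) : ∀ (d : PySem.Dict String Int) (n : Int) (s : PySem.Set Int),
    pvInv d n →
    pvInv (p.foldl pvStepA (d, n, s)).1 (p.foldl pvStepA (d, n, s)).2.1 ∧
    pvExt d (p.foldl pvStepA (d, n, s)).1 ∧
    (∀ c ∈ p, (p.foldl pvStepA (d, n, s)).1.contains c = true) ∧
    (∀ d', pvExt (p.foldl pvStepA (d, n, s)).1 d' →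
      (p.foldl pvStepA (d, n, s)).2.2 =
        p.foldl (fun t c => PySem.Set.add t (d'.getD c 0)) s) := by
  induction p with
  | nil =>
    intro d n s h
    exact ⟨h, fun c v hv => hv, by simp, fun _ _ => rfl⟩
  | cons c p ih =>
    intro d n s h
    obtain ⟨h1, hext1, hc1, hset1⟩ := pvStepA_spec d n s c h
    have hfold : (c :: p).foldl pvStepA (d, n, s) =
        p.foldl pvStepA ((pvStepA (d, n, s) c).1, (pvStepA (d, n, s) c).2.1,
          (pvStepA (d, n, s) c).2.2) := rfl
    obtain ⟨ih1, ihext, ihcont, ihset⟩ :=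
      ih (pvStepA (d, n, s) c).1 (pvStepA (d, n, s) c).2.1 (pvStepA (d, n, s) c).2.2 h1
    rw [hfold]
    refine ⟨ih1, ?_, ?_, ?_⟩
    · exact fun c' v hv => ihext c' v (hext1 c' v hv)
    · intro c' hc'
      rcases List.mem_cons.mp hc' with hce | hcp
      · subst hce
        rw [PySem.Dict.contains_eq_isSome_get?] at hc1 ⊢
        obtain ⟨v, hv⟩ := Option.isSome_iff_exists.mp hc1
        rw [ihext c' v hv]; rfl
      · exact ihcont c' hcp
    · intro d' hd'
      have hext2 : pvExt (pvStepA (d, n, s) c).1 d' := fun c' v hv => hd' c' v (ihext c' v hv)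
      have hgd : (pvStepA (d, n, s) c).1.getD c 0 = d'.getD c 0 := by
        rw [PySem.Dict.contains_eq_isSome_get?] at hc1
        obtain ⟨v, hv⟩ := Option.isSome_iff_exists.mp hc1
        rw [PySem.Dict.getD_eq_get?_getD, PySem.Dict.getD_eq_get?_getD, hv, hext2 c v hv]
      rw [ihset d' hd', hset1, hgd]
      rfl

def pvBStep (st : PySem.Dict String Int × Int × List (Int × PySem.Set Int)) (ip : Int × List String) :
    PySem.Dict String Int × Int × List (Int × PySem.Set Int) :=
  let pr := ip.2.foldl pvStepA (st.1, st.2.1, PySem.Set.empty)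
  (pr.1, pr.2.1, st.2.2 ++ [(ip.1, pr.2.2)])

theorem pvBuildSpec (fav : List (List String)) :
    ∀ (k : Int) (d : PySem.Dict String Int) (n : Int) (acc : List (Int × PySem.Set Int)),
    pvInv d n →
    pvInv ((PySem.List.enumerate fav k).foldl pvBStep (d, n, acc)).1
          ((PySem.List.enumerate fav k).foldl pvBStep (d, n, acc)).2.1 ∧
    pvExt d ((PySem.List.enumerate fav k).foldl pvBStep (d, n, acc)).1 ∧
    (∀ c, c ∈ fav.flatten → ((PySem.List.enumerate fav k).foldl pvBStep (d, n, acc)).1.contains c = true) ∧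
    ((PySem.List.enumerate fav k).foldl pvBStep (d, n, acc)).2.2 =
      acc ++ (PySem.List.enumerate fav k).map (fun ip =>
        (ip.1, PySem.Set.ofList (ip.2.map (fun c =>
          ((PySem.List.enumerate fav k).foldl pvBStep (d, n, acc)).1.getD c 0)))) := by
  induction fav with
  | nil =>
    intro k d n s h
    exact ⟨h, fun c v hv => hv, by simp, by simp [PySem.List.enumerate]⟩
  | cons p fav ih =>
    intro k d n acc h
    obtain ⟨h1, hext1, hcont1, hset1⟩ := pvFoldP p d n PySem.Set.empty h
    have hstep : pvBStep (d, n, acc) (k, p) =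
        ((p.foldl pvStepA (d, n, PySem.Set.empty)).1,
         (p.foldl pvStepA (d, n, PySem.Set.empty)).2.1,
         acc ++ [(k, (p.foldl pvStepA (d, n, PySem.Set.empty)).2.2)]) := rfl
    obtain ⟨ih1, ihext, ihcont, ihset⟩ :=
      ih (k + 1) (p.foldl pvStepA (d, n, PySem.Set.empty)).1
        (p.foldl pvStepA (d, n, PySem.Set.empty)).2.1
        (acc ++ [(k, (p.foldl pvStepA (d, n, PySem.Set.empty)).2.2)]) h1
    rw [PySem.List.enumerate_cons, List.foldl_cons, hstep]
    refine ⟨ih1, ?_, ?_, ?_⟩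
    · exact fun c v hv => ihext c v (hext1 c v hv)
    · intro c hc
      rcases List.mem_flatten.mp hc with ⟨l, hl, hcl⟩
      rcases List.mem_cons.mp hl with hle | hlf
      · subst hle
        have := hcont1 c hcl
        rw [PySem.Dict.contains_eq_isSome_get?] at this ⊢
        obtain ⟨v, hv⟩ := Option.isSome_iff_exists.mp this
        rw [ihext c v hv]; rfl
      · exact ihcont c (List.mem_flatten.mpr ⟨l, hlf, hcl⟩)
    · rw [List.map_cons]
      have hx : (p.foldl pvStepA (d, n, PySem.Set.empty)).2.2 =
          PySem.Set.ofList (p.map (fun c =>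
            ((PySem.List.enumerate fav (k + 1)).foldl pvBStep
              ((p.foldl pvStepA (d, n, PySem.Set.empty)).1,
               (p.foldl pvStepA (d, n, PySem.Set.empty)).2.1,
               acc ++ [(k, (p.foldl pvStepA (d, n, PySem.Set.empty)).2.2)])).1.getD c 0)) := by
        conv_lhs => rw [hset1 _ ihext]
        rw [PySem.Set.ofList_eq_foldl, List.foldl_map]
        rfl
      rw [← hx, ihset]
      simp

theorem pvOfListMapPerm (f : String → Int) (p : List String)
    (hinj : ∀ a ∈ p, ∀ b ∈ p, f a = f b → a = b) :
    (PySem.Set.ofList (p.map f)).Perm ((PySem.Set.ofList p).map f) := by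
  refine (List.perm_ext_iff_of_nodup (PySem.Set.nodup_ofList _) ?_).mpr ?_
  · exact List.Nodup.map_on
      (fun x hx y hy hxy => hinj x ((PySem.Set.mem_ofList p x).mp hx)
        y ((PySem.Set.mem_ofList p y).mp hy) hxy)
      (PySem.Set.nodup_ofList p)
  · intro a
    simp [PySem.Set.mem_ofList, List.mem_map]

theorem pvLenMap (f : String → Int) (p : List String)
    (hinj : ∀ a ∈ p, ∀ b ∈ p, f a = f b → a = b) :
    PySem.Set.len (PySem.Set.ofList (p.map f)) = PySem.Set.len (PySem.Set.ofList p) := by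
  rw [pvLen, pvLen, (pvOfListMapPerm f p hinj).length_eq, List.length_map]

theorem pvSubMap (f : String → Int) (p q : List String)
    (hinj : ∀ a ∈ p ++ q, ∀ b ∈ p ++ q, f a = f b → a = b) :
    PySem.Set.issubset (PySem.Set.ofList (p.map f)) (PySem.Set.ofList (q.map f)) =
      PySem.Set.issubset (PySem.Set.ofList p) (PySem.Set.ofList q) := by
  have hiff : (∀ x ∈ PySem.Set.ofList (p.map f), x ∈ PySem.Set.ofList (q.map f)) ↔
      (∀ x ∈ PySem.Set.ofList p, x ∈ PySem.Set.ofList q) := by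
    simp only [PySem.Set.mem_ofList, List.mem_map]
    constructor
    · intro h a ha
      obtain ⟨b, hb, hba⟩ := h (f a) ⟨a, ha, rfl⟩
      have hba' : b = a := hinj b (List.mem_append.mpr (Or.inr hb))
        a (List.mem_append.mpr (Or.inl ha)) hba
      exact hba' ▸ hb
    · rintro h x ⟨a, ha, rfl⟩
      exact ⟨a, h a ha, rfl⟩
  cases h1 : PySem.Set.issubset (PySem.Set.ofList (p.map f)) (PySem.Set.ofList (q.map f)) with
  | true =>
    exact ((PySem.Set.issubset_iff _ _).mpr (hiff.mp ((PySem.Set.issubset_iff _ _).mp h1))).symm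
  | false =>
    cases h2 : PySem.Set.issubset (PySem.Set.ofList p) (PySem.Set.ofList q) with
    | false => rfl
    | true =>
      rw [(PySem.Set.issubset_iff _ _).mpr (hiff.mpr ((PySem.Set.issubset_iff _ _).mp h2))] at h1
      cases h1

theorem pvInnerA_spec (si : PySem.Set Int) (P : List (Int × PySem.Set Int))
    (hdesc : P.Pairwise (fun a b => PySem.Set.len b.2 ≤ PySem.Set.len a.2))
    (hge : ∀ t ∈ P, PySem.Set.len si ≤ PySem.Set.len t.2) :
    pvInnerA si P = P.any (fun t =>
      decide (PySem.Set.len si < PySem.Set.len t.2) && PySem.Set.issubset si t.2) := by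
  induction P with
  | nil => rfl
  | cons t P ih =>
    obtain ⟨j, sj⟩ := t
    rw [List.pairwise_cons] at hdesc
    have hgesj : PySem.Set.len si ≤ PySem.Set.len sj := hge (j, sj) List.mem_cons_self
    have hgeP : ∀ t ∈ P, PySem.Set.len si ≤ PySem.Set.len t.2 :=
      fun t ht => hge t (List.mem_cons_of_mem _ ht)
    rw [List.any_cons]
    by_cases h1 : PySem.Set.len sj = PySem.Set.len si
    · have hhead : (decide (PySem.Set.len si < PySem.Set.len sj) && PySem.Set.issubset si sj)
          = false := by
        have hx : ¬ PySem.Set.len si < PySem.Set.len sj := by omega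
        rw [decide_eq_false hx, Bool.false_and]
      have hP : P.any (fun t =>
          decide (PySem.Set.len si < PySem.Set.len t.2) && PySem.Set.issubset si t.2) = false := by
        rw [List.any_eq_false]
        intro u hu
        have h3 : PySem.Set.len u.2 ≤ PySem.Set.len sj := hdesc.1 u hu
        have h4 := hgeP u hu
        have h5 : ¬ PySem.Set.len si < PySem.Set.len u.2 := by omega
        intro hq
        rw [decide_eq_false h5, Bool.false_and] at hq
        cases hq
      show pvInnerA si ((j, sj) :: P) = _
      simp only [pvInnerA]
      rw [if_pos h1, hhead, hP]
      rfl
    · by_cases h2 : PySem.Set.issubset si sj = true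
      · have hlt : PySem.Set.len si < PySem.Set.len sj := by omega
        show pvInnerA si ((j, sj) :: P) = _
        simp only [pvInnerA]
        rw [if_neg h1, if_pos h2, decide_eq_true hlt, h2, Bool.true_and, Bool.true_or]
      · have h2' : PySem.Set.issubset si sj = false := Bool.eq_false_iff.mpr h2
        show pvInnerA si ((j, sj) :: P) = _
        simp only [pvInnerA]
        rw [if_neg h1, h2', Bool.and_false, Bool.false_or]
        exact ih hdesc.2 hgeP

theorem pvOuterA_spec (L : List (Int × PySem.Set Int))
    (hdesc : L.Pairwise (fun a b => PySem.Set.len b.2 ≤ PySem.Set.len a.2)) :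
    ∀ rest P, L = P ++ rest →
    pvOuterA P rest = (rest.filter (fun e => ! L.any (fun t =>
      decide (PySem.Set.len e.2 < PySem.Set.len t.2) && PySem.Set.issubset e.2 t.2))).map
        (fun e => e.1) := by
  intro rest
  induction rest with
  | nil => intro P _; rfl
  | cons e rest ih =>
    intro P hL
    have hd := hL ▸ hdesc
    rw [List.pairwise_append] at hd
    obtain ⟨hdP, hdR, hcross⟩ := hd
    rw [List.pairwise_cons] at hdR
    have hge : ∀ t ∈ P, PySem.Set.len e.2 ≤ PySem.Set.len t.2 :=
      fun t ht => hcross t ht e List.mem_cons_self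
    have heq : pvInnerA e.2 P = L.any (fun t =>
        decide (PySem.Set.len e.2 < PySem.Set.len t.2) && PySem.Set.issubset e.2 t.2) := by
      rw [pvInnerA_spec e.2 P hdP hge, hL, List.any_append, List.any_cons]
      have h1 : (decide (PySem.Set.len e.2 < PySem.Set.len e.2) && PySem.Set.issubset e.2 e.2)
          = false := by
        rw [decide_eq_false (by omega), Bool.false_and]
      have h2 : rest.any (fun t =>
          decide (PySem.Set.len e.2 < PySem.Set.len t.2) && PySem.Set.issubset e.2 t.2)
          = false := by
        rw [List.any_eq_false]
        intro u hu hq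
        have h3 : PySem.Set.len u.2 ≤ PySem.Set.len e.2 := hdR.1 u hu
        rw [decide_eq_false (by omega), Bool.false_and] at hq
        cases hq
      rw [h1, h2, Bool.false_or, Bool.or_false]
    have hL' : L = (P ++ [e]) ++ rest := by rw [hL, List.append_assoc]; rfl
    show (if pvInnerA e.2 P then ([] : List Int) else [e.1]) ++ pvOuterA (P ++ [e]) rest = _
    rw [ih (P ++ [e]) hL', heq, List.filter_cons]
    cases hb : L.any (fun t =>
        decide (PySem.Set.len e.2 < PySem.Set.len t.2) && PySem.Set.issubset e.2 t.2) with
    | true => simp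
    | false => simp

theorem pvEnumMap {α β : Type} (g : α → β) (xs : List α) (s : Int) :
    PySem.List.enumerate (xs.map g) s = (PySem.List.enumerate xs s).map (fun p => (p.1, g p.2)) := by
  induction xs generalizing s with
  | nil => rfl
  | cons x xs ih => simp [PySem.List.enumerate_cons, ih]

theorem pvMain (fav : List (List String)) : peopleIndexes fav = peopleIndexes_alt fav := by
  -- A's first loop, named
  have hA : peopleIndexes fav =
      PySem.List.sorted
        (pvOuterA [] (PySem.List.sorted
          ((PySem.List.enumerate fav).foldl pvBStep (PySem.Dict.empty, 0, [])).2.2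
          (fun x => PySem.Set.len x.2) true))
        (fun x => x) false := rfl
  have hInv0 : pvInv PySem.Dict.empty 0 := by
    constructor
    · intro c v hv; rw [PySem.Dict.get?_empty] at hv; cases hv
    · intro a b v ha _; rw [PySem.Dict.get?_empty] at ha; cases ha
  obtain ⟨hinv, _hext, hcont, hcs⟩ := pvBuildSpec fav 0 PySem.Dict.empty 0 [] hInv0
  -- names
  set F := ((PySem.List.enumerate fav 0).foldl pvBStep (PySem.Dict.empty, 0, [])).1 with hF
  set f : String → Int := fun c => F.getD c 0 with hf
  -- injectivity of the company encoding on the companies that occur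
  have hinjF : ∀ a ∈ fav.flatten, ∀ b ∈ fav.flatten, f a = f b → a = b := by
    intro a ha b hb hab
    have hca := hcont a ha
    have hcb := hcont b hb
    rw [PySem.Dict.contains_eq_isSome_get?] at hca hcb
    obtain ⟨va, hva⟩ := Option.isSome_iff_exists.mp hca
    obtain ⟨vb, hvb⟩ := Option.isSome_iff_exists.mp hcb
    have hga : f a = va := by show F.getD a 0 = va; rw [PySem.Dict.getD_eq_get?_getD, hva]; rfl
    have hgb : f b = vb := by show F.getD b 0 = vb; rw [PySem.Dict.getD_eq_get?_getD, hvb]; rfl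
    have : va = vb := by rw [← hga, ← hgb, hab]
    exact hinv.2 a b va hva (this ▸ hvb)
  have hmemflat : ∀ p ∈ fav, ∀ a ∈ p, a ∈ fav.flatten :=
    fun p hp a ha => List.mem_flatten.mpr ⟨p, hp, ha⟩
  -- the built list of (index, int-set) pairs
  have hcs' : ((PySem.List.enumerate fav).foldl pvBStep (PySem.Dict.empty, 0, [])).2.2 =
      (PySem.List.enumerate fav).map (fun ip => (ip.1, PySem.Set.ofList (ip.2.map f))) := by
    rw [hcs]; rfl
  rw [hA, hcs']
  set E := PySem.List.enumerate fav 0 with hE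
  set compSets := E.map (fun ip => (ip.1, PySem.Set.ofList (ip.2.map f))) with hCS
  set sortedCS := PySem.List.sorted compSets (fun x => PySem.Set.len x.2) true with hS
  have hdesc : sortedCS.Pairwise (fun a b => PySem.Set.len b.2 ≤ PySem.Set.len a.2) :=
    PySem.List.sorted_pairwise_rev compSets (fun x => PySem.Set.len x.2)
  have hperm : sortedCS.Perm compSets := PySem.List.sorted_perm compSets _ _
  have houter := pvOuterA_spec sortedCS hdesc sortedCS [] rfl
  -- the break-scan of the sorted list is a filter by a global test, over compSets
  have hfe : sortedCS.filter (fun e => ! sortedCS.any (fun t =>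
        decide (PySem.Set.len e.2 < PySem.Set.len t.2) && PySem.Set.issubset e.2 t.2)) =
      sortedCS.filter (fun e => ! compSets.any (fun t =>
        decide (PySem.Set.len e.2 < PySem.Set.len t.2) && PySem.Set.issubset e.2 t.2)) :=
    List.filter_congr (fun e _ => congrArg (fun b => !b) (List.Perm.any_eq hperm))
  rw [houter, hfe]
  -- pass from the sorted order back to index order
  have hpermAns : ((sortedCS.filter (fun e => ! compSets.any (fun t =>
        decide (PySem.Set.len e.2 < PySem.Set.len t.2) && PySem.Set.issubset e.2 t.2))).map
        (fun e => e.1)).Perm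
      ((compSets.filter (fun e => ! compSets.any (fun t =>
        decide (PySem.Set.len e.2 < PySem.Set.len t.2) && PySem.Set.issubset e.2 t.2))).map
        (fun e => e.1)) :=
    (hperm.filter _).map _
  -- B, named
  have hB : peopleIndexes_alt fav =
      ((PySem.List.enumerate (fav.map (fun p => PySem.Set.ofList p))).filter
        (fun e => ! (fav.map (fun p => PySem.Set.ofList p)).any (fun t =>
          decide (PySem.Set.len e.2 < PySem.Set.len t) && PySem.Set.issubset e.2 t))).map
        (fun e => e.1) := rfl
  have hBE : PySem.List.enumerate (fav.map (fun p => PySem.Set.ofList p)) =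
      E.map (fun p => (p.1, PySem.Set.ofList p.2)) := pvEnumMap _ fav 0
  -- the two filtered index lists coincide
  have hsame : ((compSets.filter (fun e => ! compSets.any (fun t =>
        decide (PySem.Set.len e.2 < PySem.Set.len t.2) && PySem.Set.issubset e.2 t.2))).map
        (fun e => e.1)) = peopleIndexes_alt fav := by
    rw [hB, hBE, hCS, List.filter_map, List.filter_map, List.map_map, List.map_map]
    have hpred : ∀ ip ∈ E, ((fun e => ! compSets.any (fun t =>
          decide (PySem.Set.len e.2 < PySem.Set.len t.2) && PySem.Set.issubset e.2 t.2)) ∘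
            (fun ip => (ip.1, PySem.Set.ofList (ip.2.map f)))) ip =
        ((fun e => ! (fav.map (fun p => PySem.Set.ofList p)).any (fun t =>
          decide (PySem.Set.len e.2 < PySem.Set.len t) && PySem.Set.issubset e.2 t)) ∘
            (fun p => (p.1, PySem.Set.ofList p.2))) ip := by
      intro ip hip
      have hip2 : ip.2 ∈ fav := by
        obtain ⟨k, hk, hipk⟩ := (PySem.List.mem_enumerate_iff fav 0 ip).mp hip
        rw [hipk]; exact List.getElem_mem hk
      simp only [Function.comp]
      congr 1
      rw [hCS, List.any_map]
      have hfavany : (fav.map (fun p => PySem.Set.ofList p)).any (fun t =>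
          decide (PySem.Set.len (PySem.Set.ofList ip.2) < PySem.Set.len t) &&
            PySem.Set.issubset (PySem.Set.ofList ip.2) t) =
          fav.any (fun q =>
            decide (PySem.Set.len (PySem.Set.ofList ip.2) < PySem.Set.len (PySem.Set.ofList q)) &&
              PySem.Set.issubset (PySem.Set.ofList ip.2) (PySem.Set.ofList q)) :=
        List.any_map
      rw [hfavany, ← PySem.List.map_snd_enumerate fav 0, List.any_map]
      apply PySem.List.any_congr_mem
      intro jp hjp
      have hjp2 : jp.2 ∈ fav := by
        obtain ⟨k, hk, hjpk⟩ := (PySem.List.mem_enumerate_iff fav 0 jp).mp hjp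
        rw [hjpk]; exact List.getElem_mem hk
      simp only [Function.comp]
      have hmem2 : ∀ x ∈ ip.2 ++ jp.2, x ∈ fav.flatten := by
        intro x hx
        rcases List.mem_append.mp hx with h | h
        · exact hmemflat _ hip2 x h
        · exact hmemflat _ hjp2 x h
      have hinj2 : ∀ a ∈ ip.2 ++ jp.2, ∀ b ∈ ip.2 ++ jp.2, f a = f b → a = b :=
        fun a ha b hb => hinjF a (hmem2 a ha) b (hmem2 b hb)
      have hinji : ∀ a ∈ ip.2, ∀ b ∈ ip.2, f a = f b → a = b :=
        fun a ha b hb => hinjF a (hmemflat _ hip2 a ha) b (hmemflat _ hip2 b hb)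
      have hinjj : ∀ a ∈ jp.2, ∀ b ∈ jp.2, f a = f b → a = b :=
        fun a ha b hb => hinjF a (hmemflat _ hjp2 a ha) b (hmemflat _ hjp2 b hb)
      rw [pvLenMap f ip.2 hinji, pvLenMap f jp.2 hinjj, pvSubMap f ip.2 jp.2 hinj2]
    rw [List.filter_congr hpred]
    rfl
  -- B's index list is strictly increasing, and sorted() of a permutation of it returns it
  apply PySem.List.sorted_eq_of_perm_of_pairwise_lt
  · exact hsame ▸ hpermAns.symm
  · rw [hB, hBE, List.filter_map, List.map_map]
    apply (List.pairwise_map).mpr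
    apply List.Pairwise.sublist List.filter_sublist
    exact PySem.List.pairwise_lt_enumerate fav 0

-- ===== VERDICT (by name: the statement is the Claim_ definition above) =====
theorem peopleIndexes_spec : Claim_equal_peopleIndexes := by
  intro fav _
  unfold Spec_peopleIndexes
  exact pvMain fav
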